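-- pv_equiv track=rewrite | github.com/koudougoulaurent/appli_KBIS | BACKUP_AVANT_MAJ_20251019_001723/paiements/api_views.py | _convertir_mois_francais_api
-- ===== SOURCE A (Python) =====
-- def _convertir_mois_francais_api(mois_anglais):
--     """Convertit les mois anglais en français pour l'API"""
--     if not mois_anglais:
--         return mois_anglais
--
--     mois_francais = {
--         'January': 'Janvier',
--         'February': 'Février',
--         'March': 'Mars',
--         'April': 'Avril',
--         'May': 'Mai',
--         'June': 'Juin',
--         'July': 'Juillet',
--         'August': 'Août',
--         'September': 'Septembre',
--         'October': 'Octobre',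
--         'November': 'Novembre',
--         'December': 'Décembre'
--     }
--
--     # Remplacer tous les mois anglais par les mois français
--     resultat = mois_anglais
--     for mois_en, mois_fr in mois_francais.items():
--         resultat = resultat.replace(mois_en, mois_fr)
--
--     return resultat
-- ===== SOURCE B (Python) =====
-- _TRADUCTIONS = [
--     ('January', 'Janvier'), ('February', 'Février'), ('March', 'Mars'),
--     ('April', 'Avril'), ('May', 'Mai'), ('June', 'Juin'),
--     ('July', 'Juillet'), ('August', 'Août'), ('September', 'Septembre'),
--     ('October', 'Octobre'), ('November', 'Novembre'), ('December', 'Décembre'),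
-- ]
--
--
-- def _convertir_mois_francais_api(mois_anglais):
--     """Convertit les mois anglais en français pour l'API (balayage unique)"""
--     if not mois_anglais:
--         return mois_anglais
--     morceaux = []
--     i, n = 0, len(mois_anglais)
--     while i < n:
--         for en, fr in _TRADUCTIONS:
--             if mois_anglais.startswith(en, i):
--                 morceaux.append(fr)
--                 i += len(en)
--                 break
--         else:
--             morceaux.append(mois_anglais[i])
--             i += 1
--     return ''.join(morceaux)
-- ===== Notes on version B (the rewrite author's own statement) =====
-- stated objective: alternative
-- what changed: Replaces A's twelve sequential full-string str.replace passes by a single left-to-right scan that, at each position, substitutes the first English month name starting there (no month name overlaps another or any French output, so the results coincide).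
import Mathlib
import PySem

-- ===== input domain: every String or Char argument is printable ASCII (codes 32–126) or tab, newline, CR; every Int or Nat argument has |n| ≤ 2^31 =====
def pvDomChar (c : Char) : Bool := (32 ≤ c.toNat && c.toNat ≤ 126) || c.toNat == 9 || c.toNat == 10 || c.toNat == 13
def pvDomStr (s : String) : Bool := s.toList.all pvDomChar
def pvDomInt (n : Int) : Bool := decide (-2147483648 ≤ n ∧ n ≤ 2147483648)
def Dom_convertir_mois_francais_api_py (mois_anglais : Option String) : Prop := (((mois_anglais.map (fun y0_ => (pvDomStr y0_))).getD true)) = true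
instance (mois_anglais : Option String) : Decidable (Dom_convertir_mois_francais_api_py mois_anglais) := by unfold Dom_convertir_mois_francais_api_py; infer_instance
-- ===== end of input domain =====

-- B replaces A's twelve sequential whole-string str.replace passes by one single left-to-right
-- scan substituting the first month name that starts at each position (objective: alternative).

-- ===== PORT A =====
-- the dict literal as an association list in insertion order; .items() iterates it in this order
def pvMois : List (String × String) :=
  [("January","Janvier"),("February","Février"),("March","Mars"),("April","Avril"),
   ("May","Mai"),("June","Juin"),("July","Juillet"),("August","Août"),
   ("September","Septembre"),("October","Octobre"),("November","Novembre"),("December","Décembre")]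

def convertir_mois_francais_api_py (mois_anglais : Option String) : Option String :=
  match mois_anglais with
  | none => none                     -- 'if not mois_anglais: return mois_anglais' (None is falsy)
  | some s =>
    if s = "" then some s            -- the empty string is falsy too
    else some (pvMois.foldl (fun resultat p => PySem.Str.replace resultat p.1 p.2) s)

-- ===== PORT B =====
-- B's month table, over code points
def pvMoisB : List (List Char × List Char) :=
  [("January".toList, "Janvier".toList),
   ("February".toList, "Février".toList),
   ("March".toList, "Mars".toList),
   ("April".toList, "Avril".toList),
   ("May".toList, "Mai".toList),
   ("June".toList, "Juin".toList),
   ("July".toList, "Juillet".toList),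
   ("August".toList, "Août".toList),
   ("September".toList, "Septembre".toList),
   ("October".toList, "Octobre".toList),
   ("November".toList, "Novembre".toList),
   ("December".toList, "Décembre".toList)]

-- B's inner for-loop: the first table entry whose English name starts at the current position
def pvFirstMatch (tbl : List (List Char × List Char)) (l : List Char) : Option (List Char × List Char) :=
  tbl.findSome? (fun p => if p.1 ≠ [] ∧ p.1.isPrefixOf l then some p else none)

-- B's while-loop: one left-to-right pass (drop (len-1) of the tail = skipping the matched name)
def pvSubst (tbl : List (List Char × List Char)) : List Char → List Char
  | [] => []
  | c :: t =>
    match pvFirstMatch tbl (c :: t) with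
    | some p => p.2 ++ pvSubst tbl (List.drop (p.1.length - 1) t)
    | none => c :: pvSubst tbl t
termination_by l => l.length
decreasing_by
  · have : (List.drop (p.1.length - 1) t).length ≤ t.length := by
      simp [List.length_drop]
    simp only [List.length_cons]
    omega
  · simp

def convertir_mois_francais_api_py_alt (mois_anglais : Option String) : Option String :=
  match mois_anglais with
  | none => none
  | some s =>
    if s = "" then some s
    else some (String.ofList (pvSubst pvMoisB s.toList))

-- ===== PRECONDITION & SPEC =====
def Spec_convertir_mois_francais_api_py (mois_anglais : Option String) (out : Option String) : Prop := out = convertir_mois_francais_api_py_alt mois_anglais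
instance (mois_anglais : Option String) (out : Option String) : Decidable (Spec_convertir_mois_francais_api_py mois_anglais out) := by unfold Spec_convertir_mois_francais_api_py; infer_instance

-- ===== CLAIM (what is proved, stated in full; the proofs are below) =====
def Claim_equal_convertir_mois_francais_api_py : Prop := ∀ (mois_anglais : Option String), Dom_convertir_mois_francais_api_py mois_anglais → Spec_convertir_mois_francais_api_py mois_anglais (convertir_mois_francais_api_py mois_anglais)

-- ===== LEMMAS AND PROOFS =====

theorem pvFirstMatch_spec {tbl : List (List Char × List Char)} {l : List Char}
    {p : List Char × List Char} (h : pvFirstMatch tbl l = some p) :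
    p.1 ≠ [] ∧ p.1 <+: l ∧ p ∈ tbl := by
  induction tbl with
  | nil => simp [pvFirstMatch] at h
  | cons q T ih =>
    rw [pvFirstMatch, List.findSome?_cons] at h
    by_cases hc : q.1 ≠ [] ∧ q.1.isPrefixOf l
    · rw [if_pos hc] at h
      simp at h
      subst h
      exact ⟨hc.1, List.isPrefixOf_iff_prefix.mp hc.2, List.mem_cons_self⟩
    · rw [if_neg hc] at h
      have h' : pvFirstMatch T l = some p := h
      exact ⟨(ih h').1, (ih h').2.1, List.mem_cons_of_mem _ (ih h').2.2⟩

theorem pvDrop_eq {a : List Char} (ha : a ≠ []) (c : Char) (cs : List Char) :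
    List.drop (a.length - 1) cs = List.drop a.length (c :: cs) := by
  cases a with
  | nil => exact absurd rfl ha
  | cons x xs => simp

theorem pvSubst_nil (tbl : List (List Char × List Char)) : pvSubst tbl [] = [] := by
  rw [pvSubst]

theorem pvSubst_cons_of_match {tbl : List (List Char × List Char)} {l : List Char}
    {p : List Char × List Char} (hm : pvFirstMatch tbl l = some p) :
    pvSubst tbl l = p.2 ++ pvSubst tbl (List.drop p.1.length l) := by
  obtain ⟨hne, hpre, -⟩ := pvFirstMatch_spec hm
  cases l with
  | nil => exact absurd (List.prefix_nil.mp hpre) hne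
  | cons c t =>
    rw [pvSubst, hm]
    show p.2 ++ pvSubst tbl (List.drop (p.1.length - 1) t) = _
    rw [pvDrop_eq hne c t]

theorem pvSubst_cons_of_none {tbl : List (List Char × List Char)} {c : Char} {t : List Char}
    (hm : pvFirstMatch tbl (c :: t) = none) :
    pvSubst tbl (c :: t) = c :: pvSubst tbl t := by
  rw [pvSubst, hm]

theorem pvSubst_nil_tbl (l : List Char) : pvSubst [] l = l := by
  induction l with
  | nil => exact pvSubst_nil []
  | cons c t ih =>
    rw [pvSubst_cons_of_none (by simp [pvFirstMatch]), ih]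

theorem pvFirstMatch_append (T R : List (List Char × List Char)) (l : List Char) :
    pvFirstMatch (T ++ R) l =
      match pvFirstMatch T l with
      | some p => some p
      | none => pvFirstMatch R l := by
  unfold pvFirstMatch
  rw [List.findSome?_append]
  cases List.findSome? (fun p => if p.1 ≠ [] ∧ p.1.isPrefixOf l then some p else none) T <;> rfl

theorem pvPrefix_tri {u v a : List Char} (h : a <+: u ++ v) : a <+: u ∨ u <+: a := by
  obtain ⟨w, hw⟩ := h
  rcases Nat.le_total a.length u.length with hle | hle
  · left
    have h1 : a = (u ++ v).take a.length := by
      rw [← hw, List.take_left']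
      rfl
    rw [h1, List.take_append_of_le_length hle]
    exact List.take_prefix _ _
  · right
    have h1 : u = (a ++ w).take u.length := by
      rw [hw, List.take_left']
      rfl
    rw [h1, List.take_append_of_le_length hle]
    exact List.take_prefix _ _

theorem pvSubst_append (tbl : List (List Char × List Char)) (u v : List Char)
    (Hu : ∀ t ∈ u.tails, t ≠ [] → ∀ p ∈ tbl, ¬ t <+: p.1 ∧ ¬ p.1 <+: t) :
    pvSubst tbl (u ++ v) = u ++ pvSubst tbl v := by
  induction u with
  | nil => rfl
  | cons c u' ih =>
    have hnone : pvFirstMatch tbl (c :: (u' ++ v)) = none := by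
      cases hm : pvFirstMatch tbl (c :: (u' ++ v)) with
      | none => rfl
      | some p =>
        obtain ⟨hne, hpre, hmem⟩ := pvFirstMatch_spec hm
        have hpre' : p.1 <+: (c :: u') ++ v := by simpa using hpre
        have hu := Hu (c :: u') (List.mem_tails _ _ |>.mpr (List.suffix_refl _)) (by simp) p hmem
        rcases pvPrefix_tri hpre' with h | h
        · exact absurd h hu.2
        · exact absurd h hu.1
    rw [List.cons_append, pvSubst_cons_of_none hnone,
        ih (fun t ht hne p hp => Hu t (by
          rw [List.mem_tails] at ht ⊢
          exact ht.trans (List.suffix_cons _ _)) hne p hp)]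
    rfl

theorem pvSubst_no_create (tbl : List (List Char × List Char)) (e : List Char)
    (H3' : ∀ t ∈ e.tails, t ≠ [] → ∀ p ∈ tbl, ¬ t <+: p.2 ∧ ¬ p.2 <+: t) :
    ∀ x t, t ∈ e.tails → t ≠ [] → t <+: pvSubst tbl x → t <+: x := by
  intro x
  induction x with
  | nil =>
    intro t _ hne hp
    rw [pvSubst_nil] at hp
    exact absurd (List.prefix_nil.mp hp) hne
  | cons c x' ih =>
    intro t hts hne hp
    cases hm : pvFirstMatch tbl (c :: x') with
    | some p =>
      obtain ⟨-, -, hmem⟩ := pvFirstMatch_spec hm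
      rw [pvSubst_cons_of_match hm] at hp
      have h3 := H3' t hts hne p hmem
      rcases pvPrefix_tri hp with h | h
      · exact absurd h h3.1
      · exact absurd h h3.2
    | none =>
      rw [pvSubst_cons_of_none hm] at hp
      cases t with
      | nil => exact absurd rfl hne
      | cons th tt =>
        obtain ⟨hth, htt⟩ := List.cons_prefix_cons.mp hp
        subst hth
        have htt' : tt ∈ e.tails := by
          rw [List.mem_tails] at hts ⊢
          exact (List.suffix_cons th tt).trans hts
        by_cases httn : tt = []
        · subst httn
          simp
        · have := ih tt htt' httn htt
          exact List.cons_prefix_cons.mpr ⟨rfl, this⟩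

theorem pvStep (T : List (List Char × List Char)) (e f : List Char)
    (He : e ≠ [])
    (H4 : ∀ t ∈ e.tails, t ≠ [] → ∀ p ∈ T, ¬ t <+: p.1 ∧ ¬ p.1 <+: t)
    (H3' : ∀ t ∈ e.tails, t ≠ [] → ∀ p ∈ T, ¬ t <+: p.2 ∧ ¬ p.2 <+: t)
    (H3 : ∀ p ∈ T, ∀ t ∈ p.2.tails, t ≠ [] → ¬ t <+: e ∧ ¬ e <+: t) :
    ∀ s, pvSubst [(e, f)] (pvSubst T s) = pvSubst (T ++ [(e, f)]) s := by
  have key : ∀ n (s : List Char), s.length ≤ n →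
      pvSubst [(e, f)] (pvSubst T s) = pvSubst (T ++ [(e, f)]) s := by
    intro n
    induction n with
    | zero =>
      intro s hs
      have : s = [] := List.length_eq_zero_iff.mp (Nat.le_zero.mp hs)
      subst this
      simp [pvSubst_nil]
    | succ n ih =>
      intro s hs
      cases s with
      | nil => simp [pvSubst_nil]
      | cons c cs =>
        cases hm : pvFirstMatch T (c :: cs) with
        | some p =>
          obtain ⟨hne, hpre, hmem⟩ := pvFirstMatch_spec hm
          have hm' : pvFirstMatch (T ++ [(e, f)]) (c :: cs) = some p := by
            rw [pvFirstMatch_append, hm]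
          rw [pvSubst_cons_of_match hm, pvSubst_cons_of_match hm']
          have hu : ∀ t ∈ p.2.tails, t ≠ [] → ∀ q ∈ [(e, f)], ¬ t <+: q.1 ∧ ¬ q.1 <+: t := by
            intro t ht htn q hq
            rw [List.mem_singleton] at hq
            subst hq
            exact H3 p hmem t ht htn
          rw [pvSubst_append [(e, f)] p.2 _ hu]
          congr 1
          apply ih
          have h1 : 1 ≤ p.1.length := Nat.one_le_iff_ne_zero.mpr (by simpa using hne)
          simp only [List.length_drop, List.length_cons] at *
          omega
        | none =>
          by_cases he : e <+: (c :: cs)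
          · have he2 := he
            obtain ⟨v, hv⟩ := he2
            have hmB : pvFirstMatch [(e, f)] (c :: cs) = some (e, f) := by
              simp [pvFirstMatch, He, List.isPrefixOf_iff_prefix, he]
            have hm' : pvFirstMatch (T ++ [(e, f)]) (c :: cs) = some (e, f) := by
              rw [pvFirstMatch_append, hm, hmB]
            rw [pvSubst_cons_of_match hm']
            have hsplit : pvSubst T (c :: cs) = e ++ pvSubst T v := by
              rw [← hv]
              exact pvSubst_append T e v (fun t ht htn p hp => H4 t ht htn p hp)
            rw [hsplit]
            have hmB2 : pvFirstMatch [(e, f)] (e ++ pvSubst T v) = some (e, f) := by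
              have : (e : List Char) <+: e ++ pvSubst T v := ⟨pvSubst T v, rfl⟩
              simp [pvFirstMatch, He, List.isPrefixOf_iff_prefix, this]
            rw [pvSubst_cons_of_match hmB2]
            simp only [List.drop_left]
            have hdrop : List.drop e.length (c :: cs) = v := by
              rw [← hv, List.drop_left]
            rw [hdrop]
            congr 1
            apply ih
            have h1 : 1 ≤ e.length := Nat.one_le_iff_ne_zero.mpr (by simpa using He)
            have : (e ++ v).length = cs.length + 1 := by rw [hv]; simp
            simp only [List.length_append] at this
            simp only [List.length_cons] at hs
            omega
          · have hmB : pvFirstMatch [(e, f)] (c :: cs) = none := by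
              simp [pvFirstMatch, List.isPrefixOf_iff_prefix, he]
            have hm' : pvFirstMatch (T ++ [(e, f)]) (c :: cs) = none := by
              rw [pvFirstMatch_append, hm, hmB]
            rw [pvSubst_cons_of_none hm, pvSubst_cons_of_none hm']
            have hnc : pvFirstMatch [(e, f)] (c :: pvSubst T cs) = none := by
              cases hq : pvFirstMatch [(e, f)] (c :: pvSubst T cs) with
              | none => rfl
              | some q =>
                obtain ⟨hqne, hqpre, hqmem⟩ := pvFirstMatch_spec hq
                rw [List.mem_singleton] at hqmem
                subst hqmem
                have hstep : (e : List Char) <+: pvSubst T (c :: cs) := by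
                  rw [pvSubst_cons_of_none hm]
                  exact hqpre
                have := pvSubst_no_create T e H3' (c :: cs) e
                  (List.mem_tails _ _ |>.mpr (List.suffix_refl _)) He hstep
                exact absurd this he
            rw [pvSubst_cons_of_none hnc]
            congr 1
            apply ih
            simpa using Nat.le_of_succ_le_succ hs
  exact fun s => key s.length s le_rfl

theorem pvGo_eq (old new : List Char) (ho : old ≠ []) :
    ∀ fuel (l : List Char) (acc : List Char), l.length ≤ fuel →
      PySem.Chars.replace.go old new fuel l acc = acc.reverse ++ pvSubst [(old, new)] l := by
  intro fuel
  induction fuel with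
  | zero =>
    intro l acc hl
    have : l = [] := List.length_eq_zero_iff.mp (Nat.le_zero.mp hl)
    subst this
    rw [PySem.Chars.replace.go, pvSubst_nil]
  | succ n ih =>
    intro l acc hl
    cases l with
    | nil =>
      have hgo : PySem.Chars.replace.go old new (n + 1) [] acc = acc.reverse := by
        rw [PySem.Chars.replace.go]
        omega
      rw [hgo, pvSubst_nil]
      simp
    | cons c t =>
      rw [PySem.Chars.replace.go]
      by_cases hp : old.isPrefixOf (c :: t)
      · rw [if_pos hp]
        have hpre : old <+: c :: t := List.isPrefixOf_iff_prefix.mp hp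
        have hm : pvFirstMatch [(old, new)] (c :: t) = some (old, new) := by
          simp [pvFirstMatch, ho, hpre]
        rw [pvSubst_cons_of_match hm]
        have h1 : 1 ≤ old.length := Nat.one_le_iff_ne_zero.mpr (by simpa using ho)
        have hlen : (List.drop old.length (c :: t)).length ≤ n := by
          simp only [List.length_drop, List.length_cons]
          simp only [List.length_cons] at hl
          omega
        rw [ih _ _ hlen]
        simp
      · rw [if_neg hp]
        have hpre' : ¬ old <+: c :: t := fun hh => hp (List.isPrefixOf_iff_prefix.mpr hh)
        have hm : pvFirstMatch [(old, new)] (c :: t) = none := by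
          simp [pvFirstMatch, hpre']
        rw [pvSubst_cons_of_none hm]
        have hlen : t.length ≤ n := by
          simp only [List.length_cons] at hl
          omega
        rw [ih _ _ hlen]
        simp

theorem pvReplace_eq_subst (old new : List Char) (ho : old ≠ []) (l : List Char) :
    PySem.Chars.replace l old new = pvSubst [(old, new)] l := by
  rw [PySem.Chars.replace]
  rw [if_neg (by simpa using ho)]
  simpa using pvGo_eq old new ho l.length l [] le_rfl

-- folding A's twelve replace passes equals B's single pass with the full table
theorem pvFold_eq (s : List Char) :
    pvMoisB.foldl (fun l q => PySem.Chars.replace l q.1 q.2) s = pvSubst pvMoisB s := by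
  have step1 : ∀ l, PySem.Chars.replace (pvSubst ([] : List (List Char × List Char)) l) "January".toList "Janvier".toList =
      pvSubst [("January".toList, "Janvier".toList)] l := by
    intro l
    rw [pvReplace_eq_subst _ _ (by decide),
        pvStep _ _ _ (by decide) (by decide) (by decide) (by decide)]
    simp only [List.nil_append]
  have step2 : ∀ l, PySem.Chars.replace (pvSubst [("January".toList, "Janvier".toList)] l) "February".toList "Février".toList =
      pvSubst [("January".toList, "Janvier".toList),
      ("February".toList, "Février".toList)] l := by
    intro l
    rw [pvReplace_eq_subst _ _ (by decide),
        pvStep _ _ _ (by decide) (by decide) (by decide) (by decide)]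
    simp only [List.cons_append, List.nil_append]
  have step3 : ∀ l, PySem.Chars.replace (pvSubst [("January".toList, "Janvier".toList),
    ("February".toList, "Février".toList)] l) "March".toList "Mars".toList =
      pvSubst [("January".toList, "Janvier".toList),
      ("February".toList, "Février".toList),
      ("March".toList, "Mars".toList)] l := by
    intro l
    rw [pvReplace_eq_subst _ _ (by decide),
        pvStep _ _ _ (by decide) (by decide) (by decide) (by decide)]
    simp only [List.cons_append, List.nil_append]
  have step4 : ∀ l, PySem.Chars.replace (pvSubst [("January".toList, "Janvier".toList),
    ("February".toList, "Février".toList),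
    ("March".toList, "Mars".toList)] l) "April".toList "Avril".toList =
      pvSubst [("January".toList, "Janvier".toList),
      ("February".toList, "Février".toList),
      ("March".toList, "Mars".toList),
      ("April".toList, "Avril".toList)] l := by
    intro l
    rw [pvReplace_eq_subst _ _ (by decide),
        pvStep _ _ _ (by decide) (by decide) (by decide) (by decide)]
    simp only [List.cons_append, List.nil_append]
  have step5 : ∀ l, PySem.Chars.replace (pvSubst [("January".toList, "Janvier".toList),
    ("February".toList, "Février".toList),
    ("March".toList, "Mars".toList),
    ("April".toList, "Avril".toList)] l) "May".toList "Mai".toList =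
      pvSubst [("January".toList, "Janvier".toList),
      ("February".toList, "Février".toList),
      ("March".toList, "Mars".toList),
      ("April".toList, "Avril".toList),
      ("May".toList, "Mai".toList)] l := by
    intro l
    rw [pvReplace_eq_subst _ _ (by decide),
        pvStep _ _ _ (by decide) (by decide) (by decide) (by decide)]
    simp only [List.cons_append, List.nil_append]
  have step6 : ∀ l, PySem.Chars.replace (pvSubst [("January".toList, "Janvier".toList),
    ("February".toList, "Février".toList),
    ("March".toList, "Mars".toList),
    ("April".toList, "Avril".toList),
    ("May".toList, "Mai".toList)] l) "June".toList "Juin".toList =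
      pvSubst [("January".toList, "Janvier".toList),
      ("February".toList, "Février".toList),
      ("March".toList, "Mars".toList),
      ("April".toList, "Avril".toList),
      ("May".toList, "Mai".toList),
      ("June".toList, "Juin".toList)] l := by
    intro l
    rw [pvReplace_eq_subst _ _ (by decide),
        pvStep _ _ _ (by decide) (by decide) (by decide) (by decide)]
    simp only [List.cons_append, List.nil_append]
  have step7 : ∀ l, PySem.Chars.replace (pvSubst [("January".toList, "Janvier".toList),
    ("February".toList, "Février".toList),
    ("March".toList, "Mars".toList),
    ("April".toList, "Avril".toList),
    ("May".toList, "Mai".toList),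
    ("June".toList, "Juin".toList)] l) "July".toList "Juillet".toList =
      pvSubst [("January".toList, "Janvier".toList),
      ("February".toList, "Février".toList),
      ("March".toList, "Mars".toList),
      ("April".toList, "Avril".toList),
      ("May".toList, "Mai".toList),
      ("June".toList, "Juin".toList),
      ("July".toList, "Juillet".toList)] l := by
    intro l
    rw [pvReplace_eq_subst _ _ (by decide),
        pvStep _ _ _ (by decide) (by decide) (by decide) (by decide)]
    simp only [List.cons_append, List.nil_append]
  have step8 : ∀ l, PySem.Chars.replace (pvSubst [("January".toList, "Janvier".toList),
    ("February".toList, "Février".toList),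
    ("March".toList, "Mars".toList),
    ("April".toList, "Avril".toList),
    ("May".toList, "Mai".toList),
    ("June".toList, "Juin".toList),
    ("July".toList, "Juillet".toList)] l) "August".toList "Août".toList =
      pvSubst [("January".toList, "Janvier".toList),
      ("February".toList, "Février".toList),
      ("March".toList, "Mars".toList),
      ("April".toList, "Avril".toList),
      ("May".toList, "Mai".toList),
      ("June".toList, "Juin".toList),
      ("July".toList, "Juillet".toList),
      ("August".toList, "Août".toList)] l := by
    intro l
    rw [pvReplace_eq_subst _ _ (by decide),
        pvStep _ _ _ (by decide) (by decide) (by decide) (by decide)]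
    simp only [List.cons_append, List.nil_append]
  have step9 : ∀ l, PySem.Chars.replace (pvSubst [("January".toList, "Janvier".toList),
    ("February".toList, "Février".toList),
    ("March".toList, "Mars".toList),
    ("April".toList, "Avril".toList),
    ("May".toList, "Mai".toList),
    ("June".toList, "Juin".toList),
    ("July".toList, "Juillet".toList),
    ("August".toList, "Août".toList)] l) "September".toList "Septembre".toList =
      pvSubst [("January".toList, "Janvier".toList),
      ("February".toList, "Février".toList),
      ("March".toList, "Mars".toList),
      ("April".toList, "Avril".toList),
      ("May".toList, "Mai".toList),
      ("June".toList, "Juin".toList),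
      ("July".toList, "Juillet".toList),
      ("August".toList, "Août".toList),
      ("September".toList, "Septembre".toList)] l := by
    intro l
    rw [pvReplace_eq_subst _ _ (by decide),
        pvStep _ _ _ (by decide) (by decide) (by decide) (by decide)]
    simp only [List.cons_append, List.nil_append]
  have step10 : ∀ l, PySem.Chars.replace (pvSubst [("January".toList, "Janvier".toList),
    ("February".toList, "Février".toList),
    ("March".toList, "Mars".toList),
    ("April".toList, "Avril".toList),
    ("May".toList, "Mai".toList),
    ("June".toList, "Juin".toList),
    ("July".toList, "Juillet".toList),
    ("August".toList, "Août".toList),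
    ("September".toList, "Septembre".toList)] l) "October".toList "Octobre".toList =
      pvSubst [("January".toList, "Janvier".toList),
      ("February".toList, "Février".toList),
      ("March".toList, "Mars".toList),
      ("April".toList, "Avril".toList),
      ("May".toList, "Mai".toList),
      ("June".toList, "Juin".toList),
      ("July".toList, "Juillet".toList),
      ("August".toList, "Août".toList),
      ("September".toList, "Septembre".toList),
      ("October".toList, "Octobre".toList)] l := by
    intro l
    rw [pvReplace_eq_subst _ _ (by decide),
        pvStep _ _ _ (by decide) (by decide) (by decide) (by decide)]
    simp only [List.cons_append, List.nil_append]
  have step11 : ∀ l, PySem.Chars.replace (pvSubst [("January".toList, "Janvier".toList),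
    ("February".toList, "Février".toList),
    ("March".toList, "Mars".toList),
    ("April".toList, "Avril".toList),
    ("May".toList, "Mai".toList),
    ("June".toList, "Juin".toList),
    ("July".toList, "Juillet".toList),
    ("August".toList, "Août".toList),
    ("September".toList, "Septembre".toList),
    ("October".toList, "Octobre".toList)] l) "November".toList "Novembre".toList =
      pvSubst [("January".toList, "Janvier".toList),
      ("February".toList, "Février".toList),
      ("March".toList, "Mars".toList),
      ("April".toList, "Avril".toList),
      ("May".toList, "Mai".toList),
      ("June".toList, "Juin".toList),
      ("July".toList, "Juillet".toList),
      ("August".toList, "Août".toList),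
      ("September".toList, "Septembre".toList),
      ("October".toList, "Octobre".toList),
      ("November".toList, "Novembre".toList)] l := by
    intro l
    rw [pvReplace_eq_subst _ _ (by decide),
        pvStep _ _ _ (by decide) (by decide) (by decide) (by decide)]
    simp only [List.cons_append, List.nil_append]
  have step12 : ∀ l, PySem.Chars.replace (pvSubst [("January".toList, "Janvier".toList),
    ("February".toList, "Février".toList),
    ("March".toList, "Mars".toList),
    ("April".toList, "Avril".toList),
    ("May".toList, "Mai".toList),
    ("June".toList, "Juin".toList),
    ("July".toList, "Juillet".toList),
    ("August".toList, "Août".toList),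
    ("September".toList, "Septembre".toList),
    ("October".toList, "Octobre".toList),
    ("November".toList, "Novembre".toList)] l) "December".toList "Décembre".toList =
      pvSubst [("January".toList, "Janvier".toList),
      ("February".toList, "Février".toList),
      ("March".toList, "Mars".toList),
      ("April".toList, "Avril".toList),
      ("May".toList, "Mai".toList),
      ("June".toList, "Juin".toList),
      ("July".toList, "Juillet".toList),
      ("August".toList, "Août".toList),
      ("September".toList, "Septembre".toList),
      ("October".toList, "Octobre".toList),
      ("November".toList, "Novembre".toList),
      ("December".toList, "Décembre".toList)] l := by
    intro l
    rw [pvReplace_eq_subst _ _ (by decide),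
        pvStep _ _ _ (by decide) (by decide) (by decide) (by decide)]
    simp only [List.cons_append, List.nil_append]
  simp only [pvMoisB, List.foldl_cons, List.foldl_nil]
  conv_lhs => rw [(pvSubst_nil_tbl s).symm]
  rw [step1, step2, step3, step4, step5, step6, step7, step8, step9, step10, step11, step12]

-- A's String-level fold, moved to code points
theorem pvStrFold (L : List (String × String)) (s : String) :
    (L.foldl (fun r p => PySem.Str.replace r p.1 p.2) s) =
      String.ofList ((L.map (fun p => (p.1.toList, p.2.toList))).foldl
        (fun l q => PySem.Chars.replace l q.1 q.2) s.toList) := by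
  induction L generalizing s with
  | nil => simp [String.ofList_toList]
  | cons p L ih =>
    simp only [List.foldl, List.map]
    rw [ih]
    congr 1
    simp [PySem.Str.replace]

-- ===== VERDICT (by name: the statement is the Claim_ definition above) =====
theorem convertir_mois_francais_api_py_spec : Claim_equal_convertir_mois_francais_api_py := by
  intro mois_anglais _
  unfold Spec_convertir_mois_francais_api_py convertir_mois_francais_api_py convertir_mois_francais_api_py_alt
  cases mois_anglais with
  | none => rfl
  | some s =>
    simp only
    split
    · rfl
    · rw [pvStrFold]
      rw [show pvMois.map (fun p => (p.1.toList, p.2.toList)) = pvMoisB by decide]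
      rw [pvFold_eq]
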